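-- pv_equiv track=rewrite | github.com/kangkyoungmin/CodingStudy-with-Python- | 6주차/P_모의고사/JY_Practice_test.py | solution
-- ===== SOURCE A (Python) =====
-- def solution(answers):
--     answer = [0] * 3
--     check = [[1, 2, 3, 4, 5], [2, 1, 2, 3, 2, 4, 2, 5],
--              [3, 3, 1, 1, 2, 2, 4, 4, 5, 5]]
--
--     for idx in range(len(answers)):
--         if answers[idx] == check[0][idx % 5]:   # 1번 수포자 정답 확인
--             answer[0] += 1
--         if answers[idx] == check[1][idx % 8]:   # 2번 수포자 정답 확인
--             answer[1] += 1
--         if answers[idx] == check[2][idx % 10]:  # 3번 수포자 정답 확인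
--             answer[2] += 1
--
--     answer_max = max(answer)    # 가장 많이 맞춘 정답 수
--     answer = [idx + 1 for idx in range(3) if answer[idx] == answer_max] # 가장 많이 맞춘 사람 확인
--
--     return answer
-- ===== SOURCE B (Python) =====
-- def solution(answers):
--     pats = ([1, 2, 3, 4, 5],
--             [2, 1, 2, 3, 2, 4, 2, 5],
--             [3, 3, 1, 1, 2, 2, 4, 4, 5, 5])
--     # Unify the three periods (5, 8, 10) to their lcm 40: table[r] holds the three
--     # expected answers at any position i with i % 40 == r.
--     table = [tuple(p[r % len(p)] for p in pats) for r in range(40)]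
--     # Aggregate the input once into a histogram keyed by (index residue mod 40, value).
--     hist = {}
--     for i, a in enumerate(answers):
--         key = (i % 40, a)
--         hist[key] = hist.get(key, 0) + 1
--     # Score each pattern from the histogram, not from the raw answers.
--     scores = [sum(c for (r, a), c in hist.items() if a == table[r][j])
--               for j in range(3)]
--     best = max(scores)
--     return [j + 1 for j in range(3) if scores[j] == best]
-- ===== Notes on version B (the rewrite author's own statement) =====
-- stated objective: alternative
-- what changed: A compares each answer against all three patterns index-by-index in one fused counting loop; B instead unifies the periods 5,8,10 into a 40-entry lcm lookup table, aggregates the answers once into a histogram keyed by (index mod 40, value), and scores each pattern from the histogram items.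
import Mathlib
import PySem

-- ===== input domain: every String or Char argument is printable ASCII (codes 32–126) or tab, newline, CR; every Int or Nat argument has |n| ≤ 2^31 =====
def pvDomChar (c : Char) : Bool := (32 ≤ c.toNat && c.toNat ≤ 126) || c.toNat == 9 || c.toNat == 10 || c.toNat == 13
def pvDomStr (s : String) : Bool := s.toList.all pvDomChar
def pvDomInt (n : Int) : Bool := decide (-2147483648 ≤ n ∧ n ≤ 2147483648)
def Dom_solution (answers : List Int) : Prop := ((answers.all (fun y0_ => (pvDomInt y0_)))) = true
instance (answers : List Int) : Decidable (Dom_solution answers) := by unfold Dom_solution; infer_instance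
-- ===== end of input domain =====

-- B replaces A's fused per-index comparison against the three patterns by a period-40
-- (lcm 5,8,10) lookup table plus a histogram keyed by (index mod 40, value), scoring
-- each pattern from the aggregated histogram; objective: alternative (same cost).

-- ===== PORT A =====
-- A's loop body: the three lockstep `if answers[idx] == check[j][idx % len]: answer[j] += 1`
-- updates on the triple of counters.
def pvStep (ans : Int × Int × Int) (idx : Nat) (a : Int) : Int × Int × Int :=
  let check : List (List Int) := [[1, 2, 3, 4, 5], [2, 1, 2, 3, 2, 4, 2, 5],
                                  [3, 3, 1, 1, 2, 2, 4, 4, 5, 5]]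
  let ans := if a = (check.getD 0 []).getD (idx % 5) 0 then (ans.1 + 1, ans.2.1, ans.2.2) else ans
  let ans := if a = (check.getD 1 []).getD (idx % 8) 0 then (ans.1, ans.2.1 + 1, ans.2.2) else ans
  let ans := if a = (check.getD 2 []).getD (idx % 10) 0 then (ans.1, ans.2.1, ans.2.2 + 1) else ans
  ans

-- for idx in range(len(answers)): idx is always in range, so getD is exact for answers[idx].
def solution (answers : List Int) : List Int :=
  let answer :=
    (List.range answers.length).foldl
      (fun ans idx => pvStep ans idx (answers.getD idx 0)) (0, 0, 0)
  let answerList : List Int := [answer.1, answer.2.1, answer.2.2]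
  let answer_max := (PySem.List.max? answerList (fun x => x)).getD 0
  ((List.range 3).filter (fun idx => answerList.getD idx 0 == answer_max)).map
    (fun idx => (idx : Int) + 1)

-- ===== PORT B =====
-- tuple(p[r % len(p)] for p in pats) is a 3-tuple; table[r][j] is pvTup3Get.
def pvTup3Get (t : Int × Int × Int) (j : Nat) : Int :=
  if j = 0 then t.1 else if j = 1 then t.2.1 else t.2.2

-- table = [tuple(p[r % len(p)] for p in pats) for r in range(40)]
def pvTable : List (Int × Int × Int) :=
  (PySem.List.pyRange 0 40 1).map (fun r =>
    (PySem.List.pyGetD [1, 2, 3, 4, 5] (PySem.Int.mod r 5) 0,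
     PySem.List.pyGetD [2, 1, 2, 3, 2, 4, 2, 5] (PySem.Int.mod r 8) 0,
     PySem.List.pyGetD [3, 3, 1, 1, 2, 2, 4, 4, 5, 5] (PySem.Int.mod r 10) 0))

def solution_alt (answers : List Int) : List Int :=
  -- hist[key] = hist.get(key, 0) + 1 over key = (i % 40, a)
  let hist :=
    (PySem.List.enumerate answers 0).foldl
      (fun (d : PySem.Dict (Int × Int) Int) p =>
        d.insert (PySem.Int.mod p.1 40, p.2) (d.getD (PySem.Int.mod p.1 40, p.2) 0 + 1))
      PySem.Dict.empty
  -- scores = [sum(c for (r, a), c in hist.items() if a == table[r][j]) for j in range(3)]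
  let scores :=
    (List.range 3).map (fun j =>
      (hist.items.map (fun kv =>
        if kv.1.2 = pvTup3Get (PySem.List.pyGetD pvTable kv.1.1 (0, 0, 0)) j then kv.2 else 0)).sum)
  let best := (PySem.List.max? scores (fun x => x)).getD 0
  ((List.range 3).filter (fun j => scores.getD j 0 == best)).map (fun j => (j : Int) + 1)

-- ===== PRECONDITION & SPEC =====
def Spec_solution (answers : List Int) (out : List Int) : Prop := out = solution_alt answers
instance (answers : List Int) (out : List Int) : Decidable (Spec_solution answers out) := by unfold Spec_solution; infer_instance

-- ===== CLAIM =====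
def Claim_equal_solution : Prop := ∀ (answers : List Int), Dom_solution answers → Spec_solution answers (solution answers)

-- ===== LEMMAS AND PROOFS =====

-- canonical per-pattern match count, generalised over the starting index k
def pvCnt (pat : List Int) (m : Nat) (xs : List Int) (k : Nat) : Nat :=
  (xs.zipIdx k).countP (fun p => decide (p.1 = pat.getD (p.2 % m) 0))

lemma pvCnt_cons (pat : List Int) (m : Nat) (a : Int) (xs : List Int) (k : Nat) :
    pvCnt pat m (a :: xs) k
      = pvCnt pat m xs (k + 1) + (if a = pat.getD (k % m) 0 then 1 else 0) := by
  simp [pvCnt, List.zipIdx_cons, List.countP_cons]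

-- A's loop equals the triple of pattern match counts
lemma pvLoop_eq (xs : List Int) : ∀ (k : Nat) (s : Int × Int × Int),
    (List.range xs.length).foldl (fun ans idx => pvStep ans (idx + k) (xs.getD idx 0)) s
      = (s.1 + pvCnt [1, 2, 3, 4, 5] 5 xs k,
         s.2.1 + pvCnt [2, 1, 2, 3, 2, 4, 2, 5] 8 xs k,
         s.2.2 + pvCnt [3, 3, 1, 1, 2, 2, 4, 4, 5, 5] 10 xs k) := by
  induction xs with
  | nil => intro k s; simp [pvCnt]
  | cons a xs ih =>
    intro k s
    rw [List.length_cons, List.range_succ_eq_map, List.foldl_cons, List.foldl_map]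
    have hbody : (fun (ans : Int × Int × Int) (idx : Nat) =>
          pvStep ans (Nat.succ idx + k) ((a :: xs).getD (Nat.succ idx) 0))
        = (fun ans idx => pvStep ans (idx + (k + 1)) (xs.getD idx 0)) := by
      funext ans idx
      have h : Nat.succ idx + k = idx + (k + 1) := by omega
      rw [h]
      simp
    rw [hbody, ih (k + 1)]
    rw [pvCnt_cons, pvCnt_cons, pvCnt_cons]
    simp only [pvStep, List.getD_cons_zero, Nat.zero_add]
    split_ifs <;> simp_all [Prod.ext_iff] <;> omega

lemma pvLoop_eq0 (xs : List Int) :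
    (List.range xs.length).foldl (fun ans idx => pvStep ans idx (xs.getD idx 0))
        ((0, 0, 0) : Int × Int × Int)
      = ((pvCnt [1, 2, 3, 4, 5] 5 xs 0 : Int),
         (pvCnt [2, 1, 2, 3, 2, 4, 2, 5] 8 xs 0 : Int),
         (pvCnt [3, 3, 1, 1, 2, 2, 4, 4, 5, 5] 10 xs 0 : Int)) := by
  have h := pvLoop_eq xs 0 (0, 0, 0)
  simpa using h

-- Σ over a Nodup list of a single-spike function
lemma pvSum_indic {K : Type} [DecidableEq K] (D : List K) (hD : D.Nodup) (x : K) (c : Int)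
    (hx : x ∈ D) : (D.map (fun k => if k = x then c else 0)).sum = c := by
  induction D with
  | nil => cases hx
  | cons d D ih =>
    rcases List.mem_cons.mp hx with rfl | hx'
    · have hnx : x ∉ D := (List.nodup_cons.mp hD).1
      have hz : (D.map (fun k => if k = x then c else 0)) = D.map (fun _ => (0 : Int)) := by
        apply List.map_congr_left
        intro k hk
        have : k ≠ x := fun h => hnx (h ▸ hk)
        simp [this]
      simp [hz]
    · have hdx : d ≠ x := by
        rintro rfl; exact (List.nodup_cons.mp hD).1 hx'
      simp [hdx, ih (List.nodup_cons.mp hD).2 hx']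

-- Σ over a Nodup superset D of (count in ks, gated by P) = countP P over ks
lemma pvCounter_sum {K : Type} [BEq K] [LawfulBEq K] [DecidableEq K] (D : List K) (hD : D.Nodup) (P : K → Prop)
    [DecidablePred P] (ks : List K) (hsub : ∀ k ∈ ks, k ∈ D) :
    (D.map (fun k => if P k then (ks.count k : Int) else 0)).sum
      = ((ks.countP (fun k => decide (P k))) : Int) := by
  induction ks with
  | nil =>
    have hz : (D.map (fun k => if P k then ((([] : List K).count k : Int)) else 0))
        = D.map (fun _ => (0 : Int)) := by
      apply List.map_congr_left
      intro k _
      split <;> simp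
    rw [hz]
    simp
  | cons x ks ih =>
    have hx : x ∈ D := hsub x List.mem_cons_self
    have hsub' : ∀ k ∈ ks, k ∈ D := fun k hk => hsub k (List.mem_cons_of_mem _ hk)
    have hsplit : (D.map (fun k => if P k then ((x :: ks).count k : Int) else 0))
        = D.map (fun k => (if P k then (ks.count k : Int) else 0)
            + (if k = x then (if P x then (1 : Int) else 0) else 0)) := by
      apply List.map_congr_left
      intro k _
      by_cases hkx : k = x
      · subst hkx
        rw [List.count_cons_self]
        push_cast
        split <;> simp
      · have hcnt : (x :: ks).count k = ks.count k := by
          rw [List.count_cons_of_ne]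
          exact fun h => hkx h.symm
        rw [hcnt]
        simp [hkx]
    rw [hsplit]
    rw [PySem.List.sum_map_add_int, ih hsub', pvSum_indic D hD x _ hx, List.countP_cons]
    by_cases hPx : P x
    · simp [hPx]
    · simp [hPx]

-- the table lookup at residue r = i % 40, at each concrete j
lemma pvTable_lookup0 (i : Int) :
    pvTup3Get (PySem.List.pyGetD pvTable (PySem.Int.mod i 40) (0, 0, 0)) 0
      = PySem.List.pyGetD [1, 2, 3, 4, 5] (PySem.Int.mod (PySem.Int.mod i 40) 5) 0 := by
  have h0 : (0 : Int) ≤ PySem.Int.mod i 40 := PySem.Int.mod_nonneg i (by norm_num)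
  have h40 : PySem.Int.mod i 40 < 40 := PySem.Int.mod_lt i (by norm_num)
  unfold pvTable
  rw [PySem.List.pyGetD_map_pyRange_of_nonneg _ 40 _ _ h0 h40]
  simp [pvTup3Get]

lemma pvTable_lookup1 (i : Int) :
    pvTup3Get (PySem.List.pyGetD pvTable (PySem.Int.mod i 40) (0, 0, 0)) 1
      = PySem.List.pyGetD [2, 1, 2, 3, 2, 4, 2, 5] (PySem.Int.mod (PySem.Int.mod i 40) 8) 0 := by
  have h0 : (0 : Int) ≤ PySem.Int.mod i 40 := PySem.Int.mod_nonneg i (by norm_num)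
  have h40 : PySem.Int.mod i 40 < 40 := PySem.Int.mod_lt i (by norm_num)
  unfold pvTable
  rw [PySem.List.pyGetD_map_pyRange_of_nonneg _ 40 _ _ h0 h40]
  simp [pvTup3Get]

lemma pvTable_lookup2 (i : Int) :
    pvTup3Get (PySem.List.pyGetD pvTable (PySem.Int.mod i 40) (0, 0, 0)) 2
      = PySem.List.pyGetD [3, 3, 1, 1, 2, 2, 4, 4, 5, 5] (PySem.Int.mod (PySem.Int.mod i 40) 10) 0 := by
  have h0 : (0 : Int) ≤ PySem.Int.mod i 40 := PySem.Int.mod_nonneg i (by norm_num)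
  have h40 : PySem.Int.mod i 40 < 40 := PySem.Int.mod_lt i (by norm_num)
  unfold pvTable
  rw [PySem.List.pyGetD_map_pyRange_of_nonneg _ 40 _ _ h0 h40]
  simp [pvTup3Get]

-- the per-element predicate over enumerate collapses to the canonical count
lemma pvEnum_cnt (pat : List Int) (m : Nat) (hm : m ∣ 40) (xs : List Int) : ∀ k : Nat,
    (PySem.List.enumerate xs (k : Int)).countP
        (fun p => decide (p.2 = PySem.List.pyGetD pat (PySem.Int.mod (PySem.Int.mod p.1 40) (m : Int)) 0))
      = pvCnt pat m xs k := by
  induction xs with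
  | nil => intro k; simp [pvCnt, PySem.List.enumerate_nil]
  | cons a xs ih =>
    intro k
    rw [PySem.List.enumerate_cons, pvCnt_cons, List.countP_cons]
    have hcast : ((k : Int) + 1) = ((k + 1 : Nat) : Int) := by push_cast; ring
    have hmod : PySem.Int.mod (PySem.Int.mod (k : Int) 40) (m : Int)
        = ((k % m : Nat) : Int) := by
      rw [show ((40 : Int)) = ((40 : Nat) : Int) from rfl]
      rw [PySem.Int.mod_natCast k 40, PySem.Int.mod_natCast (k % 40) m,
        Nat.mod_mod_of_dvd k hm]
    rw [hcast, ih (k + 1)]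
    congr 1
    simp only [hmod, PySem.List.pyGetD_natCast, decide_eq_true_eq]

-- B's histogram score for pattern j equals the canonical count
lemma pvScore_eq (xs pat : List Int) (m : Nat) (hm : m ∣ 40) (j : Nat)
    (hpat : ∀ i : Int, pvTup3Get (PySem.List.pyGetD pvTable (PySem.Int.mod i 40) (0, 0, 0)) j
      = PySem.List.pyGetD pat (PySem.Int.mod (PySem.Int.mod i 40) (m : Int)) 0) :
    ((((PySem.List.enumerate xs 0).foldl
        (fun (d : PySem.Dict (Int × Int) Int) p =>
          d.insert (PySem.Int.mod p.1 40, p.2) (d.getD (PySem.Int.mod p.1 40, p.2) 0 + 1))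
        PySem.Dict.empty).items).map (fun kv =>
          if kv.1.2 = pvTup3Get (PySem.List.pyGetD pvTable kv.1.1 (0, 0, 0)) j then kv.2 else 0)).sum
      = (pvCnt pat m xs 0 : Int) := by
  -- the loop is a counter over the key list
  have hfold : (PySem.List.enumerate xs 0).foldl
        (fun (d : PySem.Dict (Int × Int) Int) p =>
          d.insert (PySem.Int.mod p.1 40, p.2) (d.getD (PySem.Int.mod p.1 40, p.2) 0 + 1))
        PySem.Dict.empty
      = PySem.Dict.counter ((PySem.List.enumerate xs 0).map (fun p => (PySem.Int.mod p.1 40, p.2))) := by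
    rw [← PySem.Dict.foldl_insert_getD_add_one_eq_counter, List.foldl_map]
  rw [hfold, PySem.Dict.items_counter, List.map_map]
  set ks := (PySem.List.enumerate xs 0).map (fun p => (PySem.Int.mod p.1 40, p.2)) with hks
  have hsum := pvCounter_sum (PySem.Set.ofList ks) (PySem.Set.nodup_ofList ks)
      (fun k : Int × Int => k.2 = pvTup3Get (PySem.List.pyGetD pvTable k.1 (0, 0, 0)) j) ks
      (fun k hk => (PySem.Set.mem_ofList ks k).mpr hk)
  have hcomp : ((fun kv : (Int × Int) × Int =>
        if kv.1.2 = pvTup3Get (PySem.List.pyGetD pvTable kv.1.1 (0, 0, 0)) j then kv.2 else 0)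
        ∘ fun k : Int × Int => (k, (ks.count k : Int)))
      = (fun k : Int × Int =>
        if k.2 = pvTup3Get (PySem.List.pyGetD pvTable k.1 (0, 0, 0)) j then (ks.count k : Int) else 0) := by
    funext k
    rfl
  beta_reduce at hsum
  rw [hcomp]
  refine hsum.trans ?_
  rw [hks, List.countP_map]
  have hpred : ((fun k : Int × Int =>
        decide (k.2 = pvTup3Get (PySem.List.pyGetD pvTable k.1 (0, 0, 0)) j))
        ∘ fun p : Int × Int => (PySem.Int.mod p.1 40, p.2))
      = (fun p : Int × Int =>
        decide (p.2 = PySem.List.pyGetD pat (PySem.Int.mod (PySem.Int.mod p.1 40) (m : Int)) 0)) := by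
    funext p
    simp only [Function.comp_apply, hpat p.1]
  rw [hpred]
  exact_mod_cast congrArg (fun n : Nat => (n : Int)) (by simpa using pvEnum_cnt pat m hm xs 0)

-- ===== VERDICT (by name: the statement is the Claim_ definition above) =====
theorem solution_spec : Claim_equal_solution := by
  intro answers _
  show solution answers = solution_alt answers
  unfold solution solution_alt
  simp only [pvLoop_eq0]
  have h0 := pvScore_eq answers [1, 2, 3, 4, 5] 5 (by norm_num) 0 pvTable_lookup0
  have h1 := pvScore_eq answers [2, 1, 2, 3, 2, 4, 2, 5] 8 (by norm_num) 1 pvTable_lookup1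
  have h2 := pvScore_eq answers [3, 3, 1, 1, 2, 2, 4, 4, 5, 5] 10 (by norm_num) 2 pvTable_lookup2
  simp only [show List.range 3 = [0, 1, 2] by rfl, List.map_cons, List.map_nil]
  rw [h0, h1, h2]
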